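-- pv_equiv track=rewrite | github.com/marcalph/prep | dsa_ucsd/greedy_car_fueling.py | min_refills
-- ===== SOURCE A (Python) =====
-- def min_refills(distance, tank, stops):
--     # write your code here
--     stops.append(distance)
--     refills, cur_pos = 0, 0
--     idx=0
--     while cur_pos + tank <distance:
--         # Find the farthest reachable station
--         next_idx = idx
--         while next_idx < len(stops) and stops[next_idx] <= cur_pos + tank:
--             next_idx += 1
--
--         # If we can't move forward, return -1 (impossible case)
--         if next_idx == idx:
--             return -1
--
--         # Move to the farthest reachable station
--         cur_pos = stops[next_idx - 1]
--         refills += 1  # Increment refuel count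
--         idx = next_idx  # Move to next station
--
--     return refills
-- ===== SOURCE B (Python) =====
-- def _span(limit, xs):
--     # split xs into its longest prefix of values <= limit and the remainder
--     for i, x in enumerate(xs):
--         if x > limit:
--             return xs[:i], xs[i:]
--     return xs, []
--
-- def min_refills(distance, tank, stops):
--     stops.append(distance)
--
--     def go(cur, remaining):
--         # minimum refills to reach `distance` from position `cur` with the
--         # stations in `remaining` still ahead; -1 if impossible
--         if distance <= cur + tank:
--             return 0
--         reach, rest = _span(cur + tank, remaining)
--         if not reach:
--             return -1
--         sub = go(reach[-1], rest)
--         return sub if sub < 0 else sub + 1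
--
--     return go(0, stops)
-- ===== Notes on version B (the rewrite author's own statement) =====
-- stated objective: alternative
-- what changed: A's iterative outer while-loop with an index-based inner scan and a refill accumulator is replaced by a recursive decomposition: each call splits the remaining station list into its reachable prefix and the rest, recurses on the suffix from the prefix's last station, and combines on return (adding 1, propagating -1), with no indices or accumulator.
import Mathlib
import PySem

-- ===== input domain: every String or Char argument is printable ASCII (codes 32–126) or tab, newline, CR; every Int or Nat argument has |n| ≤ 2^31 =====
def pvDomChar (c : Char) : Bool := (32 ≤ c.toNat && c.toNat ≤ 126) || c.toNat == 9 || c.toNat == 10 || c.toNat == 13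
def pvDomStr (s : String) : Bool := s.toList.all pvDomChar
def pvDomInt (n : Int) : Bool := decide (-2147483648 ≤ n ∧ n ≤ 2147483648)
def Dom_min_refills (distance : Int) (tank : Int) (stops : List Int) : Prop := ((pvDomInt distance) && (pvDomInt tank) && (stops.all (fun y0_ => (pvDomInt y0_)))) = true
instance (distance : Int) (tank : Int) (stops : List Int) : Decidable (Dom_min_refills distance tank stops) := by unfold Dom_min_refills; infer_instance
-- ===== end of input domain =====

-- B replaces A's index-driven outer/inner while loops by a recursive split of the
-- remaining station list (reachable prefix / rest) that combines on return
-- (objective: alternative). Both A and B append `distance` to the caller's `stops`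
-- list in place; the equivalence proved here is about the return value.

-- ===== PORT A =====

-- inner while loop of A: advance next_idx while stops[next_idx] <= cur_pos + tank
def scanA (stops : List Int) (limit : Int) (j : Nat) : Nat :=
  if h : j < stops.length then
    if stops[j] ≤ limit then scanA stops limit (j + 1) else j
  else j
termination_by stops.length - j
decreasing_by exact Nat.sub_succ_lt_self _ _ h

theorem scanA_ge (stops : List Int) (limit : Int) (j : Nat) : j ≤ scanA stops limit j := by
  unfold scanA
  split
  · split
    · exact Nat.le_trans (Nat.le_succ j) (scanA_ge stops limit (j + 1))
    · exact Nat.le_refl j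
  · exact Nat.le_refl j
termination_by stops.length - j
decreasing_by exact Nat.sub_succ_lt_self _ _ (by assumption)

theorem scanA_oob (stops : List Int) (limit : Int) (j : Nat) (h : ¬ j < stops.length) :
    scanA stops limit j = j := by
  unfold scanA; rw [dif_neg h]

-- outer while loop of A; state (refills, cur_pos, idx); terminates because idx strictly grows
def loopA (distance tank : Int) (stops : List Int) (refills cur_pos : Int) (idx : Nat) : Int :=
  if cur_pos + tank < distance then
    let next := scanA stops (cur_pos + tank) idx
    if h : next = idx then -1
    else
      -- stops[next_idx - 1]; in range: idx < next ≤ stops.length (getD default never used)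
      loopA distance tank stops (refills + 1) (stops.getD (next - 1) 0) next
  else refills
termination_by stops.length + 1 - idx
decreasing_by
  have h1 := scanA_ge stops (cur_pos + tank) idx
  refine (Nat.lt_or_ge idx stops.length).elim (fun h2 => ?_)
    (fun h2 => absurd (scanA_oob stops (cur_pos + tank) idx (Nat.not_lt.mpr h2)) h)
  exact Nat.sub_lt_sub_left (Nat.lt_succ_of_le (Nat.le_of_lt h2))
    (Nat.lt_of_le_of_ne h1 (fun e => h e.symm))

def min_refills (distance : Int) (tank : Int) (stops : List Int) : Int :=
  loopA distance tank (stops ++ [distance]) 0 0 0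

-- ===== PORT B =====

-- _span: longest prefix of values <= limit, and the remainder
def spanB (limit : Int) : List Int → List Int × List Int
  | [] => ([], [])
  | x :: xs =>
    if limit < x then ([], x :: xs)
    else
      let p := spanB limit xs
      (x :: p.1, p.2)

theorem spanB_snd_le (limit : Int) : (xs : List Int) → (spanB limit xs).2.length ≤ xs.length
  | [] => Nat.le_refl 0
  | x :: xs =>
    if h : limit < x then by
      rw [spanB, if_pos h]
    else by
      rw [spanB, if_neg h]
      exact Nat.le_succ_of_le (spanB_snd_le limit xs)

theorem spanB_snd_lt (limit : Int) (xs : List Int) (h : (spanB limit xs).1 ≠ []) :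
    (spanB limit xs).2.length < xs.length :=
  match xs with
  | [] => absurd rfl h
  | x :: xs =>
    if hx : limit < x then by
      rw [spanB, if_pos hx] at h
      exact absurd rfl h
    else by
      rw [spanB, if_neg hx]
      exact Nat.lt_succ_of_le (spanB_snd_le limit xs)

-- recursive go of B: split remaining into reachable prefix / rest, recurse, combine
def goB (distance tank cur : Int) (remaining : List Int) : Int :=
  if distance ≤ cur + tank then 0
  else
    let p := spanB (cur + tank) remaining
    if h : p.1 = [] then -1
    else
      let sub := goB distance tank (p.1.getLast h) p.2
      if sub < 0 then sub else sub + 1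
termination_by remaining.length
decreasing_by exact spanB_snd_lt _ _ h

def min_refills_alt (distance : Int) (tank : Int) (stops : List Int) : Int :=
  goB distance tank 0 (stops ++ [distance])

-- ===== PRECONDITION & SPEC =====
def Spec_min_refills (distance : Int) (tank : Int) (stops : List Int) (out : Int) : Prop := out = min_refills_alt distance tank stops
instance (distance : Int) (tank : Int) (stops : List Int) (out : Int) : Decidable (Spec_min_refills distance tank stops out) := by unfold Spec_min_refills; infer_instance

-- ===== CLAIM (what is proved, stated in full; the proofs are below) =====
def Claim_equal_min_refills : Prop := ∀ (distance : Int) (tank : Int) (stops : List Int), Dom_min_refills distance tank stops → Spec_min_refills distance tank stops (min_refills distance tank stops)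

-- ===== LEMMAS AND PROOFS =====

theorem scanA_le (stops : List Int) (limit : Int) (j : Nat) (h : j ≤ stops.length) :
    scanA stops limit j ≤ stops.length := by
  unfold scanA
  split
  · split
    · exact scanA_le stops limit (j + 1) (by omega)
    · exact h
  · exact h
termination_by stops.length - j
decreasing_by exact Nat.sub_succ_lt_self _ _ (by assumption)

theorem scanA_step (stops : List Int) (limit : Int) (j : Nat) (h : j < stops.length)
    (hle : stops[j] ≤ limit) : scanA stops limit j = scanA stops limit (j + 1) := by
  conv_lhs => rw [scanA]
  simp [h, hle]

theorem scanA_stop (stops : List Int) (limit : Int) (j : Nat) (h : j < stops.length)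
    (hgt : limit < stops[j]) : scanA stops limit j = j := by
  unfold scanA
  simp only [h, dif_pos]
  rw [if_neg (by omega)]

theorem getD_eq (L : List Int) (j : Nat) (h : j < L.length) : L.getD j 0 = L[j] := by
  simp [List.getD_eq_getElem?_getD, List.getElem?_eq_getElem h]

-- spanB on a suffix of L is described by scanA: the prefix is the scanned block,
-- the remainder is the drop at the scan's stopping index
theorem span_scan (L : List Int) (limit : Int) :
    ∀ (n j : Nat), L.length - j = n → j ≤ L.length →
      spanB limit (L.drop j)
        = ((L.drop j).take (scanA L limit j - j), L.drop (scanA L limit j)) := by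
  intro n
  induction n with
  | zero =>
    intro j hn hj
    have hje : j = L.length := by omega
    subst hje
    have hsc : scanA L limit L.length = L.length := scanA_oob L limit L.length (by omega)
    rw [hsc]
    simp [spanB]
  | succ n ih =>
    intro j hn hj
    have hjlt : j < L.length := by omega
    have hdrop : L.drop j = L[j] :: L.drop (j + 1) := List.drop_eq_getElem_cons hjlt
    by_cases hle : L[j] ≤ limit
    · have hs : scanA L limit j = scanA L limit (j + 1) := scanA_step L limit j hjlt hle
      have ihh := ih (j + 1) (by omega) (by omega)
      have hge : j + 1 ≤ scanA L limit (j + 1) := scanA_ge L limit (j + 1)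
      rw [hdrop]
      simp only [spanB, if_neg (by omega : ¬ limit < L[j])]
      rw [ihh, hs]
      have : scanA L limit (j + 1) - j = (scanA L limit (j + 1) - (j + 1)) + 1 := by omega
      rw [this, List.take_succ_cons]
    · have hs : scanA L limit j = j := scanA_stop L limit j hjlt (by omega)
      rw [hdrop]
      simp only [spanB, if_pos (by omega : limit < L[j])]
      rw [hs]
      simp [← hdrop]

theorem getLast_take_drop (L : List Int) (j s : Nat) (hj : j < s) (hs : s ≤ L.length)
    (h : (L.drop j).take (s - j) ≠ []) :
    ((L.drop j).take (s - j)).getLast h = L[s - 1]'(by omega) := by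
  rw [List.getLast_eq_getElem]
  have hlen : ((L.drop j).take (s - j)).length = s - j := by
    simp; omega
  have h1 : ∀ (hh : ((L.drop j).take (s - j)).length - 1 < ((L.drop j).take (s - j)).length),
      ((L.drop j).take (s - j))[((L.drop j).take (s - j)).length - 1]'hh = L[s-1]'(by omega) := by
    intro hh
    rw [List.getElem_take, List.getElem_drop]
    congr 1
    omega
  exact h1 _

-- the workhorse: A's outer loop from index j equals B's recursion on the suffix L.drop j,
-- with the accumulator folded in on the way back
theorem loop_eq (distance tank : Int) (L : List Int) :
    ∀ (n j : Nat) (cur refills : Int), L.length - j = n → j ≤ L.length →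
      loopA distance tank L refills cur j
        = (if goB distance tank cur (L.drop j) < 0 then goB distance tank cur (L.drop j)
           else refills + goB distance tank cur (L.drop j)) := by
  intro n
  induction n using Nat.strong_induction_on with
  | _ n ih =>
    intro j cur refills hn hj
    rw [loopA]
    by_cases hd : cur + tank < distance
    · rw [if_pos hd]
      set s := scanA L (cur + tank) j with hsdef
      have hge : j ≤ s := scanA_ge L (cur + tank) j
      have hle : s ≤ L.length := scanA_le L (cur + tank) j hj
      have hspan := span_scan L (cur + tank) n j hn hj
      rw [goB, if_neg (by omega : ¬ distance ≤ cur + tank)]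
      simp only [hspan]
      by_cases hsj : s = j
      · rw [dif_pos hsj]
        have : (L.drop j).take (s - j) = [] := by
          rw [hsj]; simp
        rw [dif_pos this]
        norm_num
      · rw [dif_neg hsj]
        have hjlt : j < s := by omega
        have hjL : j < L.length := by
          by_contra hc
          exact hsj (scanA_oob L (cur + tank) j hc)
        have hne : (L.drop j).take (s - j) ≠ [] := by
          have : ((L.drop j).take (s - j)).length = s - j := by simp; omega
          intro hcon
          rw [hcon] at this
          simp at this
          omega
        rw [dif_neg hne]
        have hlast : ((L.drop j).take (s - j)).getLast hne = L[s - 1]'(by omega) :=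
          getLast_take_drop L j s hjlt hle hne
        have hgetD : L.getD (s - 1) 0 = L[s - 1]'(by omega) := getD_eq L (s - 1) (by omega)
        have ihh := ih (L.length - s) (by omega) s (L[s - 1]'(by omega)) (refills + 1)
          rfl hle
        rw [hgetD, ihh, hlast]
        set g := goB distance tank (L[s - 1]'(by omega)) (L.drop s) with hg
        by_cases hgneg : g < 0
        · rw [if_pos hgneg, if_pos hgneg, if_pos (by omega : g < 0)]
        · rw [if_neg hgneg, if_neg hgneg, if_neg (by omega : ¬ g + 1 < 0)]
          omega
    · rw [if_neg hd]
      rw [goB, if_pos (by omega : distance ≤ cur + tank)]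
      norm_num

-- ===== VERDICT (by name: the statement is the Claim_ definition above) =====
theorem min_refills_spec : Claim_equal_min_refills := by
  intro distance tank stops _
  unfold Spec_min_refills min_refills min_refills_alt
  have h := loop_eq distance tank (stops ++ [distance]) (stops ++ [distance]).length 0 0 0
    (by omega) (by omega)
  simp only [List.drop_zero] at h
  rw [h]
  split <;> omega
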